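-- pv_equiv track=rewrite | github.com/wilmurillo-ai/Design-Assistant | .skills/openclaw-skills/skills/ninja1232123/the-krillest-for-rillest/the_interpreter.py | _infer_purpose
-- ===== SOURCE A (Python) =====
-- def _infer_purpose(func_name: str) -> str:
--     """Infer purpose from function name."""
--     name_lower = func_name.lower()
--
--     if any(x in name_lower for x in ['get', 'fetch', 'load', 'read']):
--         return f"'{func_name}' retrieves something from somewhere"
--     elif any(x in name_lower for x in ['set', 'save', 'write', 'store']):
--         return f"'{func_name}' preserves something for later"
--     elif any(x in name_lower for x in ['calc', 'compute', 'process']):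
--         return f"'{func_name}' transforms input into insight"
--     elif any(x in name_lower for x in ['check', 'valid', 'verify', 'is_']):
--         return f"'{func_name}' distinguishes truth from falsehood"
--     elif any(x in name_lower for x in ['create', 'make', 'build', 'new']):
--         return f"'{func_name}' brings something into existence"
--     elif any(x in name_lower for x in ['delete', 'remove', 'clear']):
--         return f"'{func_name}' removes something from existence"
--     elif any(x in name_lower for x in ['update', 'modify', 'change']):
--         return f"'{func_name}' transforms what is into what should be"
--     elif any(x in name_lower for x in ['init', 'setup', 'start']):
--         return f"'{func_name}' prepares the ground for what's to come"
--     else: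
--         return f"'{func_name}' does something its creator needed done"
-- ===== SOURCE B (Python) =====
-- # Instead of testing each keyword for containment per category, B scans the
-- # lowered name once position by position, looking up prefix matches in a flat
-- # keyword->priority dict and keeping the minimum priority seen; index 8 is the
-- # default.
-- _KW = {
--     'get': 0, 'fetch': 0, 'load': 0, 'read': 0,
--     'set': 1, 'save': 1, 'write': 1, 'store': 1,
--     'calc': 2, 'compute': 2, 'process': 2,
--     'check': 3, 'valid': 3, 'verify': 3, 'is_': 3,
--     'create': 4, 'make': 4, 'build': 4, 'new': 4,
--     'delete': 5, 'remove': 5, 'clear': 5,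
--     'update': 6, 'modify': 6, 'change': 6,
--     'init': 7, 'setup': 7, 'start': 7,
-- }
--
-- _SUFFIX = [
--     "retrieves something from somewhere",
--     "preserves something for later",
--     "transforms input into insight",
--     "distinguishes truth from falsehood",
--     "brings something into existence",
--     "removes something from existence",
--     "transforms what is into what should be",
--     "prepares the ground for what's to come",
--     "does something its creator needed done",
-- ]
--
--
-- def _infer_purpose(func_name: str) -> str:
--     """Infer purpose from function name."""
--     name_lower = func_name.lower()
--     best = 8
--     for j in range(len(name_lower)):
--         tail = name_lower[j:]
--         for kw, pri in _KW.items():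
--             if pri < best and tail.startswith(kw):
--                 best = pri
--     return f"'{func_name}' {_SUFFIX[best]}"
-- ===== Notes on version B (the rewrite author's own statement) =====
-- stated objective: alternative
-- what changed: Instead of A's per-category containment tests in an if/elif chain, B makes a single positional scan of the lowered name, looking up prefix matches against a flat keyword-to-priority dict and keeping the minimum priority, then indexes a suffix table (index 8 = default).
import Mathlib
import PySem

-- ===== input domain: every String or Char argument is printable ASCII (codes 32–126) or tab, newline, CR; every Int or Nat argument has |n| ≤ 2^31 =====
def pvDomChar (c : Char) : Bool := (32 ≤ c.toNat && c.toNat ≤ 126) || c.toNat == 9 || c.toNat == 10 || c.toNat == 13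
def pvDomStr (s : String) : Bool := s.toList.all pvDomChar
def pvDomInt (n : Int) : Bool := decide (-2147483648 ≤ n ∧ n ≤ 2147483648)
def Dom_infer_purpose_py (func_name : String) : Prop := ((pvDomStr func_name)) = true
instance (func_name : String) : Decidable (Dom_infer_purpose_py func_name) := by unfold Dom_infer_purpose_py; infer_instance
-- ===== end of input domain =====

-- B replaces A's per-category if/elif containment chain by a single positional
-- scan of the lowered name with a flat keyword->priority table, keeping the
-- minimum matched priority (8 = default) and indexing a suffix table
-- (objective: alternative).


-- ===== PORT A =====
def infer_purpose_py (func_name : String) : String :=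
  let name_lower := PySem.Str.lower func_name
  if ["get", "fetch", "load", "read"].any (fun x => PySem.Str.isIn x name_lower) then
    "'" ++ func_name ++ "' retrieves something from somewhere"
  else if ["set", "save", "write", "store"].any (fun x => PySem.Str.isIn x name_lower) then
    "'" ++ func_name ++ "' preserves something for later"
  else if ["calc", "compute", "process"].any (fun x => PySem.Str.isIn x name_lower) then
    "'" ++ func_name ++ "' transforms input into insight"
  else if ["check", "valid", "verify", "is_"].any (fun x => PySem.Str.isIn x name_lower) then
    "'" ++ func_name ++ "' distinguishes truth from falsehood"
  else if ["create", "make", "build", "new"].any (fun x => PySem.Str.isIn x name_lower) then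
    "'" ++ func_name ++ "' brings something into existence"
  else if ["delete", "remove", "clear"].any (fun x => PySem.Str.isIn x name_lower) then
    "'" ++ func_name ++ "' removes something from existence"
  else if ["update", "modify", "change"].any (fun x => PySem.Str.isIn x name_lower) then
    "'" ++ func_name ++ "' transforms what is into what should be"
  else if ["init", "setup", "start"].any (fun x => PySem.Str.isIn x name_lower) then
    "'" ++ func_name ++ "' prepares the ground for what's to come"
  else
    "'" ++ func_name ++ "' does something its creator needed done"

-- ===== PORT B =====
-- the flat keyword -> priority dict, in insertion order
def kwPri : List (String × Nat) :=
  [ ("get", 0), ("fetch", 0), ("load", 0), ("read", 0),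
    ("set", 1), ("save", 1), ("write", 1), ("store", 1),
    ("calc", 2), ("compute", 2), ("process", 2),
    ("check", 3), ("valid", 3), ("verify", 3), ("is_", 3),
    ("create", 4), ("make", 4), ("build", 4), ("new", 4),
    ("delete", 5), ("remove", 5), ("clear", 5),
    ("update", 6), ("modify", 6), ("change", 6),
    ("init", 7), ("setup", 7), ("start", 7) ]

def suffixTable : List String :=
  [ "retrieves something from somewhere",
    "preserves something for later",
    "transforms input into insight",
    "distinguishes truth from falsehood",
    "brings something into existence",
    "removes something from existence",
    "transforms what is into what should be",
    "prepares the ground for what's to come",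
    "does something its creator needed done" ]

def infer_purpose_py_alt (func_name : String) : String :=
  let name_lower := (PySem.Str.lower func_name).toList
  -- name_lower[j:] for 0 ≤ j is List.drop j; _SUFFIX[best] with best provably < 9
  let best := (List.range name_lower.length).foldl
    (fun best j =>
      let tail := name_lower.drop j
      kwPri.foldl
        (fun b p => if p.2 < b && PySem.Chars.startswith tail p.1.toList then p.2 else b)
        best)
    8
  "'" ++ func_name ++ "' " ++ suffixTable.getD best ""

-- ===== PRECONDITION & SPEC =====
def Spec_infer_purpose_py (func_name : String) (out : String) : Prop := out = infer_purpose_py_alt func_name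
instance (func_name : String) (out : String) : Decidable (Spec_infer_purpose_py func_name out) := by unfold Spec_infer_purpose_py; infer_instance

-- ===== CLAIM (what is proved, stated in full; the proofs are below) =====
def Claim_equal_infer_purpose_py : Prop := ∀ (func_name : String), Dom_infer_purpose_py func_name → Spec_infer_purpose_py func_name (infer_purpose_py func_name)

-- ===== LEMMAS AND PROOFS =====

-- one min-keeping update of B's scan
def step (tail : List Char) (b : Nat) (p : String × Nat) : Nat :=
  if p.2 < b && PySem.Chars.startswith tail p.1.toList then p.2 else b

lemma foldl_step_le (tail : List Char) :
    ∀ (l : List (String × Nat)) (b : Nat), l.foldl (step tail) b ≤ b := by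
  intro l
  induction l with
  | nil => simp
  | cons q l ih =>
    intro b
    simp only [List.foldl_cons, step]
    split
    · rename_i h
      have hlt : q.2 < b := by
        simp only [Bool.and_eq_true, decide_eq_true_eq] at h
        exact h.1
      exact le_trans (ih _) (le_of_lt hlt)
    · exact ih b

lemma foldl_step_le_of_match (tail : List Char) (p : String × Nat)
    (hs : PySem.Chars.startswith tail p.1.toList = true) :
    ∀ (l : List (String × Nat)), p ∈ l → ∀ b, l.foldl (step tail) b ≤ p.2 := by
  intro l
  induction l with
  | nil => intro h; simp at h
  | cons q l ih =>
    intro hp b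
    simp only [List.foldl_cons]
    rcases List.mem_cons.1 hp with h | h
    · subst h
      by_cases hlt : p.2 < b
      · rw [step, if_pos (by simp [hlt, hs])]
        exact foldl_step_le tail l p.2
      · have : step tail b p = b := by simp [step, hlt]
        rw [this]
        exact le_trans (foldl_step_le tail l b) (by omega)
    · exact ih h _

lemma foldl_step_eq_or (tail : List Char) :
    ∀ (l : List (String × Nat)) (b : Nat), l.foldl (step tail) b = b ∨
      ∃ p ∈ l, PySem.Chars.startswith tail p.1.toList = true ∧ l.foldl (step tail) b = p.2 := by
  intro l
  induction l with
  | nil => simp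
  | cons q l ih =>
    intro b
    simp only [List.foldl_cons]
    by_cases hc : step tail b q = b
    · rw [hc]
      rcases ih b with h | ⟨p, hp, hsw, he⟩
      · exact Or.inl h
      · exact Or.inr ⟨p, List.mem_cons_of_mem _ hp, hsw, he⟩
    · have hq : step tail b q = q.2 ∧ PySem.Chars.startswith tail q.1.toList = true := by
        unfold step at hc ⊢
        split at hc
        · rename_i h
          simp only [Bool.and_eq_true, decide_eq_true_eq] at h
          exact ⟨by rw [if_pos (by simp [h.1, h.2])], h.2⟩
        · exact absurd rfl hc
      rw [hq.1]
      rcases ih q.2 with h | ⟨p, hp, hsw, he⟩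
      · exact Or.inr ⟨q, List.mem_cons_self, hq.2, h⟩
      · exact Or.inr ⟨p, List.mem_cons_of_mem _ hp, hsw, he⟩

-- outer fold over positions
lemma foldl_outer_le (cs : List Char) :
    ∀ (js : List Nat) (b : Nat),
      js.foldl (fun b j => kwPri.foldl (step (cs.drop j)) b) b ≤ b := by
  intro js
  induction js with
  | nil => simp
  | cons j js ih =>
    intro b
    simp only [List.foldl_cons]
    exact le_trans (ih _) (foldl_step_le _ kwPri b)

lemma foldl_outer_le_of_match (cs : List Char) (p : String × Nat) (hp : p ∈ kwPri) (j : Nat)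
    (hs : PySem.Chars.startswith (cs.drop j) p.1.toList = true) :
    ∀ (js : List Nat), j ∈ js → ∀ b,
      js.foldl (fun b j => kwPri.foldl (step (cs.drop j)) b) b ≤ p.2 := by
  intro js
  induction js with
  | nil => intro h; simp at h
  | cons j' js ih =>
    intro hj b
    simp only [List.foldl_cons]
    rcases List.mem_cons.1 hj with h | h
    · subst h
      exact le_trans (foldl_outer_le cs js _) (foldl_step_le_of_match _ p hs kwPri hp b)
    · exact ih h _

lemma foldl_outer_eq_or (cs : List Char) :
    ∀ (js : List Nat) (b : Nat),
      js.foldl (fun b j => kwPri.foldl (step (cs.drop j)) b) b = b ∨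
      ∃ j ∈ js, ∃ p ∈ kwPri, PySem.Chars.startswith (cs.drop j) p.1.toList = true ∧
        js.foldl (fun b j => kwPri.foldl (step (cs.drop j)) b) b = p.2 := by
  intro js
  induction js with
  | nil => simp
  | cons j js ih =>
    intro b
    simp only [List.foldl_cons]
    rcases ih (kwPri.foldl (step (cs.drop j)) b) with h' | ⟨j', hj', p, hp, hsw, he⟩
    · rcases foldl_step_eq_or (cs.drop j) kwPri b with h'' | ⟨p, hp, hsw, he⟩
      · exact Or.inl (h'.trans h'')
      · exact Or.inr ⟨j, List.mem_cons_self, p, hp, hsw, h'.trans he⟩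
    · exact Or.inr ⟨j', List.mem_cons_of_mem _ hj', p, hp, hsw, he⟩

-- kwPri facts
lemma kwPri_ne_nil : ∀ p ∈ kwPri, p.1.toList ≠ [] := by decide

lemma kwPri_lt8 : ∀ p ∈ kwPri, p.2 < 8 := by decide

-- an in-range prefix occurrence is exactly a substring occurrence (keywords are nonempty)
lemma match_iff_isIn (cs : List Char) (p : String × Nat) (hne : p.1.toList ≠ []) :
    (∃ j ∈ List.range cs.length, PySem.Chars.startswith (cs.drop j) p.1.toList = true)
      ↔ PySem.Chars.isIn p.1.toList cs = true := by
  rw [← PySem.Chars.exists_prefix_drop_iff_isIn]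
  constructor
  · rintro ⟨j, _, hs⟩
    exact ⟨j, (PySem.Chars.startswith_iff _ _).1 hs⟩
  · rintro ⟨j, hpre⟩
    by_cases hj : j < cs.length
    · exact ⟨j, List.mem_range.2 hj, (PySem.Chars.startswith_iff _ _).2 hpre⟩
    · exfalso
      rw [List.drop_eq_nil_of_le (le_of_not_gt hj)] at hpre
      exact hne (List.eq_nil_of_prefix_nil hpre)

-- B's best value, named
def bestOf (cs : List Char) : Nat :=
  (List.range cs.length).foldl (fun b j => kwPri.foldl (step (cs.drop j)) b) 8

-- "some keyword of priority g occurs somewhere in cs"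
def Matches (cs : List Char) (g : Nat) : Prop :=
  ∃ p ∈ kwPri, p.2 = g ∧ PySem.Chars.isIn p.1.toList cs = true

lemma bestOf_le_of_matches (cs : List Char) (g : Nat) (h : Matches cs g) : bestOf cs ≤ g := by
  rcases h with ⟨p, hp, hg, hin⟩
  rcases (match_iff_isIn cs p (kwPri_ne_nil p hp)).2 hin with ⟨j, hj, hs⟩
  exact hg ▸ foldl_outer_le_of_match cs p hp j hs _ hj 8

lemma bestOf_spec (cs : List Char) : bestOf cs = 8 ∨ Matches cs (bestOf cs) := by
  rcases foldl_outer_eq_or cs (List.range cs.length) 8 with h | ⟨j, hj, p, hp, hsw, he⟩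
  · exact Or.inl h
  · exact Or.inr ⟨p, hp, he.symm,
      (match_iff_isIn cs p (kwPri_ne_nil p hp)).1 ⟨j, hj, hsw⟩⟩

lemma matches_prio_lt (cs : List Char) (g : Nat) (h : Matches cs g) : g < 8 := by
  rcases h with ⟨p, hp, hg, _⟩
  exact hg ▸ kwPri_lt8 p hp

-- Matches cs g, for each concrete group g, is A's group condition
lemma matches_iff (cs : List Char) (g : Nat) (hg : g < 8) :
    Matches cs g ↔
      (if g = 0 then ["get", "fetch", "load", "read"]
       else if g = 1 then ["set", "save", "write", "store"]
       else if g = 2 then ["calc", "compute", "process"]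
       else if g = 3 then ["check", "valid", "verify", "is_"]
       else if g = 4 then ["create", "make", "build", "new"]
       else if g = 5 then ["delete", "remove", "clear"]
       else if g = 6 then ["update", "modify", "change"]
       else ["init", "setup", "start"]).any
        (fun x => PySem.Chars.isIn x.toList cs) = true := by
  interval_cases g <;>
    simp [Matches, kwPri, List.any_eq_true] <;>
    constructor <;> intro h <;> tauto

lemma str_isIn_any (xs : List String) (s : String) :
    xs.any (fun x => PySem.Str.isIn x s) = xs.any (fun x => PySem.Chars.isIn x.toList s.toList) := by
  simp [PySem.Str.isIn_eq]

lemma assemble (fn s1 s2 : String) (h : "' " ++ s2 = s1) :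
    "'" ++ fn ++ s1 = "'" ++ fn ++ "' " ++ s2 := by
  rw [← h, ← String.append_assoc]

lemma alt_eq (fn : String) :
    infer_purpose_py_alt fn =
      "'" ++ fn ++ "' " ++ suffixTable.getD (bestOf (PySem.Str.lower fn).toList) "" := rfl

lemma bestOf_pin (cs : List Char) (g : Nat) (hg : g < 8)
    (hmatch : Matches cs g) (hnone : ∀ m < g, ¬ Matches cs m) : bestOf cs = g := by
  have hle := bestOf_le_of_matches cs g hmatch
  rcases bestOf_spec cs with h | h
  · omega
  · by_contra hne
    exact hnone _ (by omega) h

lemma bestOf_default (cs : List Char) (hnone : ∀ m < 8, ¬ Matches cs m) : bestOf cs = 8 := by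
  rcases bestOf_spec cs with h | h
  · exact h
  · exact absurd h (hnone _ (matches_prio_lt cs _ h))

-- ===== VERDICT (by name: the statement is the Claim_ definition above) =====
theorem infer_purpose_py_spec : Claim_equal_infer_purpose_py := by
  intro func_name _
  unfold Spec_infer_purpose_py
  rw [alt_eq]
  set cs := (PySem.Str.lower func_name).toList with hcs
  unfold infer_purpose_py
  simp only [str_isIn_any, ← hcs]
  split_ifs with h0 h1 h2 h3 h4 h5 h6 h7
  · rw [bestOf_pin cs 0 (by omega) ((matches_iff cs 0 (by omega)).2 h0) (by omega)]
    exact assemble _ _ _ rfl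
  · rw [bestOf_pin cs 1 (by omega) ((matches_iff cs 1 (by omega)).2 h1)
      (by intro m hm hM; interval_cases m <;> rw [matches_iff _ _ (by omega)] at hM <;> simp_all)]
    exact assemble _ _ _ rfl
  · rw [bestOf_pin cs 2 (by omega) ((matches_iff cs 2 (by omega)).2 h2)
      (by intro m hm hM; interval_cases m <;> rw [matches_iff _ _ (by omega)] at hM <;> simp_all)]
    exact assemble _ _ _ rfl
  · rw [bestOf_pin cs 3 (by omega) ((matches_iff cs 3 (by omega)).2 h3)
      (by intro m hm hM; interval_cases m <;> rw [matches_iff _ _ (by omega)] at hM <;> simp_all)]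
    exact assemble _ _ _ rfl
  · rw [bestOf_pin cs 4 (by omega) ((matches_iff cs 4 (by omega)).2 h4)
      (by intro m hm hM; interval_cases m <;> rw [matches_iff _ _ (by omega)] at hM <;> simp_all)]
    exact assemble _ _ _ rfl
  · rw [bestOf_pin cs 5 (by omega) ((matches_iff cs 5 (by omega)).2 h5)
      (by intro m hm hM; interval_cases m <;> rw [matches_iff _ _ (by omega)] at hM <;> simp_all)]
    exact assemble _ _ _ rfl
  · rw [bestOf_pin cs 6 (by omega) ((matches_iff cs 6 (by omega)).2 h6)
      (by intro m hm hM; interval_cases m <;> rw [matches_iff _ _ (by omega)] at hM <;> simp_all)]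
    exact assemble _ _ _ rfl
  · rw [bestOf_pin cs 7 (by omega) ((matches_iff cs 7 (by omega)).2 h7)
      (by intro m hm hM; interval_cases m <;> rw [matches_iff _ _ (by omega)] at hM <;> simp_all)]
    exact assemble _ _ _ rfl
  · rw [bestOf_default cs
      (by intro m hm hM; interval_cases m <;> rw [matches_iff _ _ (by omega)] at hM <;> simp_all)]
    exact assemble _ _ _ rfl
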